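-- pv_equiv track=rewrite | github.com/turkish-nlp-suite/Turkish-subwords-research | benchmarking/transformers/ner/train_ner.py | decode_preds_to_spans
-- ===== SOURCE A (Python) =====
-- from typing import List, Dict, Any, Optional, Tuple
--
-- def decode_preds_to_spans(pred_ids: List[List[int]], label_ids: List[List[int]], id2label: Dict[int,str], word_ids_list: List[List[Optional[int]]]) -> Tuple[List[List[str]], List[List[str]]]:
--     # Convert token-level BIO predictions back to word-level BIO for seqeval
--     pred_tags_word, gold_tags_word = [], []
--     for pred_row, gold_row, word_ids in zip(pred_ids, label_ids, word_ids_list):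
--         # Reconstruct per-word tags: take the first-subword tag per word (ignore -100)
--         word_to_pred = {}
--         word_to_gold = {}
--         for tid, (p, g, w) in enumerate(zip(pred_row, gold_row, word_ids)):
--             if w is None: continue
--             if w not in word_to_pred: word_to_pred[w] = id2label.get(p, "O")
--             if g != -100 and (w not in word_to_gold): word_to_gold[w] = id2label.get(g, "O")
--         # Normalize to contiguous word order starting from 0
--         max_w = max(word_to_pred.keys() | word_to_gold.keys()) if (word_to_pred or word_to_gold) else -1
--         pred_seq, gold_seq = [], []
--         for w in range(max_w+1):
--             pred_seq.append(word_to_pred.get(w, "O"))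
--             gold_seq.append(word_to_gold.get(w, "O"))
--         pred_tags_word.append(pred_seq)
--         gold_tags_word.append(gold_seq)
--     return pred_tags_word, gold_tags_word
-- ===== SOURCE B (Python) =====
-- def decode_preds_to_spans(pred_ids, label_ids, id2label, word_ids_list):
--     # Per word index, search the token triples for its first subword (nested scan, no dicts)
--     pred_tags_word, gold_tags_word = [], []
--     for pred_row, gold_row, word_ids in zip(pred_ids, label_ids, word_ids_list):
--         triples = list(zip(pred_row, gold_row, word_ids))
--         max_w = max((w for _, _, w in triples if w is not None), default=-1)
--         pred_seq, gold_seq = [], []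
--         for w in range(max_w + 1):
--             pred_seq.append(next((id2label.get(p, "O") for p, g, w2 in triples if w2 == w), "O"))
--             gold_seq.append(next((id2label.get(g, "O") for p, g, w2 in triples if w2 == w and g != -100), "O"))
--         pred_tags_word.append(pred_seq)
--         gold_tags_word.append(gold_seq)
--     return pred_tags_word, gold_tags_word
-- ===== Notes on version B (the rewrite author's own statement) =====
-- stated objective: alternative
-- what changed: B drops A's first-seen dicts entirely: it computes the max word id directly, then for each word index searches the token triples for that word's first subword (a nested per-word scan via next(...) instead of a single indexing pass building two hash maps).
import Mathlib
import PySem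

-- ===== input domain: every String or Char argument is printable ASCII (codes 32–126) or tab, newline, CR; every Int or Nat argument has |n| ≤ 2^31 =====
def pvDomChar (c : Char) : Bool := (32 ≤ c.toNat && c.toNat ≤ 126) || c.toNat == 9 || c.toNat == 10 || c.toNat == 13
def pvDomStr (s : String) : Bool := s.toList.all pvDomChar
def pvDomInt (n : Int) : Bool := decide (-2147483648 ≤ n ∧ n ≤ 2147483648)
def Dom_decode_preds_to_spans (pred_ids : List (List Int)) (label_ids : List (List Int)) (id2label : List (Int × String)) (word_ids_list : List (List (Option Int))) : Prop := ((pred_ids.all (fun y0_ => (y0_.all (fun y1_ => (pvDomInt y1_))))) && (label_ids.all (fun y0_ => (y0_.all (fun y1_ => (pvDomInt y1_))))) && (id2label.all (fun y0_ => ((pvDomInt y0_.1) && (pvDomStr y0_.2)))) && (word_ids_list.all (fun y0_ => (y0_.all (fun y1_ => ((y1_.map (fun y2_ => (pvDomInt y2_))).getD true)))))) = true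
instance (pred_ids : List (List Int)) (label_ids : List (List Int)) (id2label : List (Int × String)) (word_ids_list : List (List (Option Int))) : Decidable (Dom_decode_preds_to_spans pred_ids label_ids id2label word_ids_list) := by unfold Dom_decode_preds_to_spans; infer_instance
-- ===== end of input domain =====

-- B drops A's first-seen dicts: it takes the max word id directly and then, per word index,
-- searches the token triples for that word's first subword (objective: alternative, stateless nested scan).

-- ===== PORT A =====
-- inner dict-building loop body of A (the enumerate index tid is unused in A and therefore dropped)
def pvStepA (lab : PySem.Dict Int String) (st : PySem.Dict Int String × PySem.Dict Int String)
    (t : Int × Int × Option Int) : PySem.Dict Int String × PySem.Dict Int String :=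
  match t.2.2 with
  | none => st
  | some w =>
    (if st.1.contains w then st.1 else st.1.insert w (lab.getD t.1 "O"),
     if t.2.1 ≠ -100 ∧ st.2.contains w = false then st.2.insert w (lab.getD t.2.1 "O") else st.2)

-- one iteration of A's outer loop
def pvRowA (lab : PySem.Dict Int String) (pred_row gold_row : List Int)
    (word_ids : List (Option Int)) : List String × List String :=
  let triples := pred_row.zip (gold_row.zip word_ids)
  let dicts := triples.foldl (pvStepA lab) (PySem.Dict.empty, PySem.Dict.empty)
  let max_w : Int :=
    if dicts.1.size ≠ 0 ∨ dicts.2.size ≠ 0 then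
      -- max over the nonempty key-set union; the none arm is unreachable
      match PySem.List.max? (PySem.Set.union (PySem.Set.ofList dicts.1.keys) dicts.2.keys) (fun x => x) with
      | some m => m
      | none => -1
    else -1
  (PySem.List.pyRange 0 (max_w + 1) 1).foldl
    (fun acc w => (acc.1 ++ [dicts.1.getD w "O"], acc.2 ++ [dicts.2.getD w "O"])) ([], [])

def decode_preds_to_spans (pred_ids : List (List Int)) (label_ids : List (List Int)) (id2label : List (Int × String)) (word_ids_list : List (List (Option Int))) : List (List String) × List (List String) :=
  let lab : PySem.Dict Int String := PySem.Dict.mk id2label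
  (pred_ids.zip (label_ids.zip word_ids_list)).foldl
    (fun acc r =>
      let s := pvRowA lab r.1 r.2.1 r.2.2
      (acc.1 ++ [s.1], acc.2 ++ [s.2])) ([], [])

-- ===== PORT B =====
-- next((id2label.get(p, "O") for p, g, w2 in triples if w2 == w), "O")
def pvFirstP (lab : PySem.Dict Int String) (ts : List (Int × Int × Option Int)) (w : Int) : String :=
  match ts.find? (fun t => t.2.2 == some w) with
  | some t => lab.getD t.1 "O"
  | none => "O"

-- next((id2label.get(g, "O") for p, g, w2 in triples if w2 == w and g != -100), "O")
def pvFirstG (lab : PySem.Dict Int String) (ts : List (Int × Int × Option Int)) (w : Int) : String :=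
  match ts.find? (fun t => t.2.2 == some w && !(t.2.1 == -100)) with
  | some t => lab.getD t.2.1 "O"
  | none => "O"

-- one iteration of B's outer loop: max word id, then a per-word search over the triples
def pvRowB (lab : PySem.Dict Int String) (pred_row gold_row : List Int)
    (word_ids : List (Option Int)) : List String × List String :=
  let triples := pred_row.zip (gold_row.zip word_ids)
  -- max((w for _, _, w in triples if w is not None), default=-1)
  let max_w : Int := PySem.List.maxD (triples.filterMap (fun t => t.2.2)) (fun x => x) (-1)
  (PySem.List.pyRange 0 (max_w + 1) 1).foldl
    (fun acc w => (acc.1 ++ [pvFirstP lab triples w], acc.2 ++ [pvFirstG lab triples w])) ([], [])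

def decode_preds_to_spans_alt (pred_ids : List (List Int)) (label_ids : List (List Int)) (id2label : List (Int × String)) (word_ids_list : List (List (Option Int))) : List (List String) × List (List String) :=
  let lab : PySem.Dict Int String := PySem.Dict.mk id2label
  (pred_ids.zip (label_ids.zip word_ids_list)).foldl
    (fun acc r =>
      let s := pvRowB lab r.1 r.2.1 r.2.2
      (acc.1 ++ [s.1], acc.2 ++ [s.2])) ([], [])

-- ===== PRECONDITION & SPEC =====
def Spec_decode_preds_to_spans (pred_ids : List (List Int)) (label_ids : List (List Int)) (id2label : List (Int × String)) (word_ids_list : List (List (Option Int))) (out : List (List String) × List (List String)) : Prop := out = decode_preds_to_spans_alt pred_ids label_ids id2label word_ids_list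
instance (pred_ids : List (List Int)) (label_ids : List (List Int)) (id2label : List (Int × String)) (word_ids_list : List (List (Option Int))) (out : List (List String) × List (List String)) : Decidable (Spec_decode_preds_to_spans pred_ids label_ids id2label word_ids_list out) := by unfold Spec_decode_preds_to_spans; infer_instance

-- ===== CLAIM (what is proved, stated in full; the proofs are below) =====
def Claim_equal_decode_preds_to_spans : Prop := ∀ (pred_ids : List (List Int)) (label_ids : List (List Int)) (id2label : List (Int × String)) (word_ids_list : List (List (Option Int))), Dom_decode_preds_to_spans pred_ids label_ids id2label word_ids_list → Spec_decode_preds_to_spans pred_ids label_ids id2label word_ids_list (decode_preds_to_spans pred_ids label_ids id2label word_ids_list)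

-- ===== LEMMAS AND PROOFS =====

-- first tag written for word w by the triples (default "O"): what A's dicts end up holding
def pvFPred (lab : PySem.Dict Int String) : List (Int × Int × Option Int) → Int → String
  | [], _ => "O"
  | t :: ts, w => if t.2.2 = some w then lab.getD t.1 "O" else pvFPred lab ts w

def pvFGold (lab : PySem.Dict Int String) : List (Int × Int × Option Int) → Int → String
  | [], _ => "O"
  | t :: ts, w => if t.2.2 = some w ∧ t.2.1 ≠ -100 then lab.getD t.2.1 "O" else pvFGold lab ts w

def pvHasP (ts : List (Int × Int × Option Int)) (w : Int) : Bool :=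
  ts.any (fun t => t.2.2 = some w)

def pvHasG (ts : List (Int × Int × Option Int)) (w : Int) : Bool :=
  ts.any (fun t => decide (t.2.2 = some w ∧ t.2.1 ≠ -100))

theorem pvFoldA_spec (lab : PySem.Dict Int String) (ts : List (Int × Int × Option Int))
    (dp dg : PySem.Dict Int String) (w : Int) :
    ((ts.foldl (pvStepA lab) (dp, dg)).1.getD w "O"
        = if dp.contains w then dp.getD w "O" else pvFPred lab ts w) ∧
    ((ts.foldl (pvStepA lab) (dp, dg)).1.contains w = (dp.contains w || pvHasP ts w)) ∧
    ((ts.foldl (pvStepA lab) (dp, dg)).2.getD w "O"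
        = if dg.contains w then dg.getD w "O" else pvFGold lab ts w) ∧
    ((ts.foldl (pvStepA lab) (dp, dg)).2.contains w = (dg.contains w || pvHasG ts w)) := by
  induction ts generalizing dp dg with
  | nil =>
    refine ⟨?_, by simp [pvHasP], ?_, by simp [pvHasG]⟩ <;>
      · simp only [List.foldl_nil, pvFPred, pvFGold]
        split_ifs with hc
        · rfl
        · exact PySem.Dict.getD_of_not_contains _ _ (by simpa using hc)
  | cons t ts ih =>
    match ht : t.2.2 with
    | none =>
      simp only [List.foldl_cons, pvStepA, ht, pvFPred, pvFGold, pvHasP, pvHasG, List.any_cons]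
      simpa [ht, pvHasP, pvHasG] using ih dp dg
    | some u =>
      simp only [List.foldl_cons, pvStepA, ht]
      obtain ⟨i1, i2, i3, i4⟩ := ih
        (if dp.contains u then dp else dp.insert u (lab.getD t.1 "O"))
        (if t.2.1 ≠ -100 ∧ dg.contains u = false then dg.insert u (lab.getD t.2.1 "O") else dg)
      refine ⟨?_, ?_, ?_, ?_⟩
      · rw [i1]
        by_cases hw : w = u
        · subst hw
          by_cases hc : dp.contains w
          · simp [hc, pvFPred, ht]
          · simp [hc, pvFPred, ht, PySem.Dict.getD_insert_self, PySem.Dict.contains_insert_self]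
        · have hbe : (w == u) = false := by simpa using hw
          simp only [pvFPred, ht, Option.some.injEq, if_neg (Ne.symm hw)]
          by_cases hc : dp.contains u <;>
            simp [hc, hw, hbe, PySem.Dict.getD_insert, PySem.Dict.contains_insert]
      · rw [i2]
        by_cases hw : w = u
        · subst hw
          by_cases hc : dp.contains w <;>
            simp [hc, pvHasP, ht, PySem.Dict.contains_insert_self]
        · have hbe : (w == u) = false := by simpa using hw
          by_cases hc : dp.contains u <;>
            simp [hc, hw, hbe, Ne.symm hw, pvHasP, ht, PySem.Dict.contains_insert]
      · by_cases hcond : t.2.1 ≠ -100 ∧ dg.contains u = false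
        · rw [i3]
          by_cases hw : w = u
          · subst hw
            simp [hcond, hcond.2, pvFGold, ht, hcond.1, PySem.Dict.getD_insert_self,
              PySem.Dict.contains_insert_self]
          · have hbe : (w == u) = false := by simpa using hw
            simp [hcond, hw, hbe, Ne.symm hw, pvFGold, ht, PySem.Dict.getD_insert,
              PySem.Dict.contains_insert]
        · have hor : ¬ (t.2.2 = some w ∧ t.2.1 ≠ -100) ∨ dg.contains w = true := by
            by_cases hw : w = u
            · subst hw
              rcases Decidable.em (t.2.1 = -100) with hg | hg
              · exact Or.inl (by simp [hg])
              · right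
                by_contra hcc
                exact hcond ⟨hg, by simpa using hcc⟩
            · exact Or.inl (by simp [ht, hw, Ne.symm hw])
          rw [i3]
          simp only [if_neg hcond]
          by_cases hc : dg.contains w
          · simp [hc]
          · have hcf : ¬ (t.2.2 = some w ∧ t.2.1 ≠ -100) := by
              rcases hor with h | h
              · exact h
              · exact absurd h (by simpa using hc)
            simp [hc, pvFGold, hcf]
      · rw [i4]
        simp only [pvHasG, List.any_cons, ht]
        by_cases hcond : t.2.1 ≠ -100 ∧ dg.contains u = false
        · by_cases hw : w = u
          · subst hw
            simp [hcond, PySem.Dict.contains_insert_self, hcond.1]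
          · have hbe : (w == u) = false := by simpa using hw
            simp [hcond, PySem.Dict.contains_insert, Ne.symm hw, hw, hbe]
        · by_cases hw : w = u
          · subst hw
            rcases Decidable.em (t.2.1 = -100) with hg | hg
            · simp [hcond, hg]
            · have : dg.contains w = true := by
                by_contra hcc
                exact hcond ⟨hg, by simpa using hcc⟩
              simp [hcond, this]
          · have hbe : (w == u) = false := by simpa using hw
            simp [hcond, Ne.symm hw, hw, hbe]

-- B's per-word searches compute exactly the first-written tags
theorem pvFirstP_eq (lab : PySem.Dict Int String) (ts : List (Int × Int × Option Int)) (w : Int) :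
    pvFirstP lab ts w = pvFPred lab ts w := by
  induction ts with
  | nil => rfl
  | cons t ts ih =>
    by_cases h : t.2.2 = some w
    · simp [pvFirstP, pvFPred, List.find?, h]
    · have hb : (t.2.2 == some w) = false := by simpa using h
      simp only [pvFirstP, pvFPred, List.find?, hb, if_neg h]
      exact ih

theorem pvFirstG_eq (lab : PySem.Dict Int String) (ts : List (Int × Int × Option Int)) (w : Int) :
    pvFirstG lab ts w = pvFGold lab ts w := by
  induction ts with
  | nil => rfl
  | cons t ts ih =>
    by_cases h : t.2.2 = some w ∧ t.2.1 ≠ -100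
    · have h1 : (t.2.2 == some w) = true := by simp [h.1]
      have h2 : (!(t.2.1 == -100)) = true := by simp [h.2]
      simp [pvFirstG, pvFGold, List.find?, h1, h2, h]
    · have hb : (t.2.2 == some w && !(t.2.1 == -100)) = false := by
        by_contra hc
        simp only [Bool.not_eq_false, Bool.and_eq_true, beq_iff_eq, Bool.not_eq_true',
          beq_eq_false_iff_ne] at hc
        exact h hc
      simp only [pvFirstG, pvFGold, List.find?, hb, if_neg h]
      exact ih

theorem pvHasP_iff (ts : List (Int × Int × Option Int)) (u : Int) :
    pvHasP ts u = true ↔ ∃ t ∈ ts, t.2.2 = some u := by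
  simp [pvHasP]

theorem pvHasG_imp_hasP (ts : List (Int × Int × Option Int)) (u : Int)
    (h : pvHasG ts u = true) : pvHasP ts u = true := by
  simp only [pvHasG, List.any_eq_true, decide_eq_true_eq] at h
  obtain ⟨t, ht, h1, _⟩ := h
  exact (pvHasP_iff ts u).mpr ⟨t, ht, h1⟩

-- membership in B's comprehension of non-None word ids
theorem pvMemWs (ts : List (Int × Int × Option Int)) (u : Int) :
    u ∈ ts.filterMap (fun t => t.2.2) ↔ pvHasP ts u = true := by
  rw [pvHasP_iff, List.mem_filterMap]

theorem pvFoldAppendPair {α β : Type} (l : List α) (f g : α → β) (acc : List β × List β) :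
    l.foldl (fun acc x => (acc.1 ++ [f x], acc.2 ++ [g x])) acc
      = (acc.1 ++ l.map f, acc.2 ++ l.map g) := by
  induction l generalizing acc with
  | nil => simp
  | cons x l ih => simp [ih]

theorem pvRow_eq (lab : PySem.Dict Int String) (p g : List Int) (w : List (Option Int)) :
    pvRowA lab p g w = pvRowB lab p g w := by
  simp only [pvRowA, pvRowB]
  generalize p.zip (g.zip w) = ts
  have hA := pvFoldA_spec lab ts PySem.Dict.empty PySem.Dict.empty
  have hA1 : ∀ x : Int,
      (ts.foldl (pvStepA lab) (PySem.Dict.empty, PySem.Dict.empty)).1.getD x "O"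
        = pvFPred lab ts x := fun x => by
    have h := (hA x).1
    simpa [PySem.Dict.contains_empty] using h
  have hC1 : ∀ x : Int,
      (ts.foldl (pvStepA lab) (PySem.Dict.empty, PySem.Dict.empty)).1.contains x
        = pvHasP ts x := fun x => by
    have h := (hA x).2.1
    simpa [PySem.Dict.contains_empty] using h
  have hA2 : ∀ x : Int,
      (ts.foldl (pvStepA lab) (PySem.Dict.empty, PySem.Dict.empty)).2.getD x "O"
        = pvFGold lab ts x := fun x => by
    have h := (hA x).2.2.1
    simpa [PySem.Dict.contains_empty] using h
  have hC2 : ∀ x : Int,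
      (ts.foldl (pvStepA lab) (PySem.Dict.empty, PySem.Dict.empty)).2.contains x
        = pvHasG ts x := fun x => by
    have h := (hA x).2.2.2
    simpa [PySem.Dict.contains_empty] using h
  -- the two max_w computations agree
  have hMax :
      (if (ts.foldl (pvStepA lab) (PySem.Dict.empty, PySem.Dict.empty)).1.size ≠ 0 ∨
          (ts.foldl (pvStepA lab) (PySem.Dict.empty, PySem.Dict.empty)).2.size ≠ 0 then
        match PySem.List.max? (PySem.Set.union
            (PySem.Set.ofList (ts.foldl (pvStepA lab) (PySem.Dict.empty, PySem.Dict.empty)).1.keys)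
            (ts.foldl (pvStepA lab) (PySem.Dict.empty, PySem.Dict.empty)).2.keys) (fun x => x) with
        | some m => m
        | none => -1
      else -1)
        = PySem.List.maxD (ts.filterMap (fun t => t.2.2)) (fun x => x) (-1) := by
    by_cases hguard :
        (ts.foldl (pvStepA lab) (PySem.Dict.empty, PySem.Dict.empty)).1.size ≠ 0 ∨
        (ts.foldl (pvStepA lab) (PySem.Dict.empty, PySem.Dict.empty)).2.size ≠ 0
    case neg =>
      -- no token carries a word id: both maxima are the default -1
      push_neg at hguard
      have hkeysnil : (ts.foldl (pvStepA lab) (PySem.Dict.empty, PySem.Dict.empty)).1.keys = [] := by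
        have h0 : (ts.foldl (pvStepA lab) (PySem.Dict.empty, PySem.Dict.empty)).1.keys.length = 0 := by
          simpa [PySem.Dict.keys, PySem.Dict.size] using hguard.1
        exact List.length_eq_zero_iff.mp h0
      have hnP : ∀ x : Int, pvHasP ts x = false := by
        intro x
        rw [← hC1 x]
        by_contra hcc
        have hx : (ts.foldl (pvStepA lab) (PySem.Dict.empty, PySem.Dict.empty)).1.contains x
            = true := by simpa using hcc
        have hmem := (PySem.Dict.contains_iff_mem_keys _ _).mp hx
        rw [hkeysnil] at hmem
        simp at hmem
      have hws : ts.filterMap (fun t => t.2.2) = [] := by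
        rw [List.eq_nil_iff_forall_not_mem]
        intro u hu
        have := (pvMemWs ts u).mp hu
        rw [hnP u] at this
        exact absurd this (by simp)
      rw [if_neg (by push_neg; exact hguard), hws]
      rfl
    case pos =>
      rw [if_pos hguard]
      -- the union of the key sets holds exactly the word ids occurring in ts
      have hUmem : ∀ y : Int,
          (y ∈ PySem.Set.union
              (PySem.Set.ofList (ts.foldl (pvStepA lab) (PySem.Dict.empty, PySem.Dict.empty)).1.keys)
              (ts.foldl (pvStepA lab) (PySem.Dict.empty, PySem.Dict.empty)).2.keys)
            ↔ pvHasP ts y = true := by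
        intro y
        rw [PySem.Set.mem_union, PySem.Set.mem_ofList,
          ← PySem.Dict.contains_iff_mem_keys, ← PySem.Dict.contains_iff_mem_keys, hC1, hC2]
        constructor
        · rintro (h | h)
          · exact h
          · exact pvHasG_imp_hasP ts y h
        · exact fun h => Or.inl h
      match hmx : PySem.List.max? (PySem.Set.union
          (PySem.Set.ofList (ts.foldl (pvStepA lab) (PySem.Dict.empty, PySem.Dict.empty)).1.keys)
          (ts.foldl (pvStepA lab) (PySem.Dict.empty, PySem.Dict.empty)).2.keys) (fun x => x) with
      | none =>
        rw [PySem.List.max?_eq_none_iff] at hmx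
        rcases hguard with h | h
        · have : (ts.foldl (pvStepA lab) (PySem.Dict.empty, PySem.Dict.empty)).1.keys ≠ [] := by
            intro h0
            apply h
            have := congrArg List.length h0
            simpa [PySem.Dict.keys, PySem.Dict.size] using this
          obtain ⟨y, hy⟩ := List.exists_mem_of_ne_nil _ this
          have : y ∈ PySem.Set.union
              (PySem.Set.ofList (ts.foldl (pvStepA lab) (PySem.Dict.empty, PySem.Dict.empty)).1.keys)
              (ts.foldl (pvStepA lab) (PySem.Dict.empty, PySem.Dict.empty)).2.keys := by
            rw [PySem.Set.mem_union, PySem.Set.mem_ofList]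
            exact Or.inl hy
          rw [hmx] at this
          simp at this
        · have : (ts.foldl (pvStepA lab) (PySem.Dict.empty, PySem.Dict.empty)).2.keys ≠ [] := by
            intro h0
            apply h
            have := congrArg List.length h0
            simpa [PySem.Dict.keys, PySem.Dict.size] using this
          obtain ⟨y, hy⟩ := List.exists_mem_of_ne_nil _ this
          have : y ∈ PySem.Set.union
              (PySem.Set.ofList (ts.foldl (pvStepA lab) (PySem.Dict.empty, PySem.Dict.empty)).1.keys)
              (ts.foldl (pvStepA lab) (PySem.Dict.empty, PySem.Dict.empty)).2.keys := by
            rw [PySem.Set.mem_union]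
            exact Or.inr hy
          rw [hmx] at this
          simp at this
      | some m =>
        have hmP : pvHasP ts m = true := (hUmem m).mp (PySem.List.max?_mem hmx)
        have hmWs : m ∈ ts.filterMap (fun t => t.2.2) := (pvMemWs ts m).mpr hmP
        match hmx' : PySem.List.max? (ts.filterMap (fun t => t.2.2)) (fun x => x) with
        | none =>
          rw [PySem.List.max?_eq_none_iff] at hmx'
          rw [hmx'] at hmWs
          simp at hmWs
        | some m' =>
          have h1 : m ≤ m' :=
            PySem.List.max?_isMax hmx' m hmWs
          have h2 : m' ≤ m := by
            apply PySem.List.max?_isMax hmx m'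
            exact (hUmem m').mpr ((pvMemWs ts m').mp (PySem.List.max?_mem hmx'))
          have hmm' : m = m' := le_antisymm h1 h2
          show m = (PySem.List.max? (ts.filterMap (fun t => t.2.2)) (fun x => x)).getD (-1)
          rw [hmx', hmm']
          rfl
  rw [hMax, pvFoldAppendPair, pvFoldAppendPair]
  refine Prod.ext ?_ ?_ <;>
    · dsimp only
      refine congrArg _ (List.map_congr_left ?_)
      intro x _
      first
      | rw [hA1 x, pvFirstP_eq]
      | rw [hA2 x, pvFirstG_eq]

-- ===== VERDICT (by name: the statement is the Claim_ definition above) =====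
theorem decode_preds_to_spans_spec : Claim_equal_decode_preds_to_spans := by
  intro pred_ids label_ids id2label word_ids_list _
  unfold Spec_decode_preds_to_spans
  simp only [decode_preds_to_spans, decode_preds_to_spans_alt]
  rw [pvFoldAppendPair, pvFoldAppendPair]
  refine Prod.ext ?_ ?_ <;>
    · dsimp only
      refine List.map_congr_left ?_
      intro r _
      rw [pvRow_eq]
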